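-- pv_equiv track=rewrite | github.com/i-am-sakthi/Practiced-Codes | Practice_with_Arrays.py | construct_dot
-- ===== SOURCE A (Python) =====
-- def construct_dot(s, t):
--
--     if t==0: return [s]
--     new_list = []
--
--     for p in range(1,len(s) - t + 1):
--
--         new_str = str(s[:p]) + '.'
--         res_str = str(s[p:])
--
--         sub_list = construct_dot(res_str, t-1)
--
--         for sl in sub_list:
--             new_list.append(new_str + sl)
--     return new_list
-- ===== SOURCE B (Python) =====
-- from itertools import combinations
--
--
-- def construct_dot(s, t):
--     # Choose the t dot positions directly: every strictly increasing tuple of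
--     # cut indices from range(1, len(s)), in lexicographic order (matching A's
--     # recursion order), then split s at those cuts and join with '.'.
--     n = len(s)
--     if t >= n and t > 0:
--         return []  # more dots than gaps between characters
--     out = []
--     for cuts in combinations(range(1, n), t):
--         bounds = (0,) + cuts + (n,)
--         out.append('.'.join(s[a:b] for a, b in zip(bounds, bounds[1:])))
--     return out
-- ===== Notes on version B (the rewrite author's own statement) =====
-- stated objective: idiomatic
-- what changed: Replaces A's recursion (choose the first cut, recurse on the suffix) by a single loop over itertools.combinations of the t cut positions (with an early [] when t exceeds the number of gaps), splitting the string once per combination.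
import Mathlib
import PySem

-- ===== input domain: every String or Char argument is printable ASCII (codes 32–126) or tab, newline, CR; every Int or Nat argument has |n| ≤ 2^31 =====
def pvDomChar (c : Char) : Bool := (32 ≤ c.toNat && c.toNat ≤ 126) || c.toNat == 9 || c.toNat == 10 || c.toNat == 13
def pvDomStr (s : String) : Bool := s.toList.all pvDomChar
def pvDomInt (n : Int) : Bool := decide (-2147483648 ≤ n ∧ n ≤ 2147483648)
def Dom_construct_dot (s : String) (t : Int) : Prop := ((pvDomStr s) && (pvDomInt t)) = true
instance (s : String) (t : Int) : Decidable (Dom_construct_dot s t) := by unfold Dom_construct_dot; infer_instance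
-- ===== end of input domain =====

-- B replaces A's suffix recursion by one loop over itertools.combinations of the dot positions (idiomatic; same cost).
-- ===== PORT A =====
-- Literal port of A.  For t < 0 the Python recursion never terminates (RecursionError);
-- those inputs are outside Pre_ and the 't < 0' guard exists only to make the Lean recursion total.
-- 'str(...)' applied to a string slice is the identity and is ported as the slice itself.
def construct_dot (s : String) (t : Int) : List String :=
  if t == 0 then [s]
  else if t < 0 then []
  else
    (PySem.List.pyRange 1 (PySem.Str.len s - t + 1)).foldl
      (fun new_list p =>
        (construct_dot (PySem.Str.slice s (some p) none) (t - 1)).foldl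
          (fun nl sl => nl ++ [(PySem.Str.slice s none (some p) ++ ".") ++ sl]) new_list) []
termination_by t.toNat
decreasing_by
  rename_i h0 hneg
  simp only [beq_iff_eq] at h0
  omega

-- ===== PORT B =====
-- Literal port of Source B.  For t < 0 the Python raises ValueError (combinations); outside Pre_.
def construct_dot_alt (s : String) (t : Int) : List String :=
  if t < 0 then []
  else if PySem.Str.len s ≤ t ∧ 0 < t then []
  else
    let n := PySem.Str.len s
    (PySem.List.combinations (PySem.List.pyRange 1 n) t.toNat).foldl
      (fun out cuts =>
        let bounds := 0 :: (cuts ++ [n])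
        out ++ [PySem.Str.join "." ((bounds.zip bounds.tail).map
          (fun ab => PySem.Str.slice s (some ab.1) (some ab.2)))]) []

-- ===== PRECONDITION & SPEC =====
-- For t < 0 the Python A never returns (RecursionError): excluded.
def Pre_construct_dot (s : String) (t : Int) : Prop := 0 ≤ t
instance (s : String) (t : Int) : Decidable (Pre_construct_dot s t) := by unfold Pre_construct_dot; infer_instance
def pvWitness_construct_dot : String × Int := ("abcd", 2)

def Spec_construct_dot (s : String) (t : Int) (out : List String) : Prop := out = construct_dot_alt s t
instance (s : String) (t : Int) (out : List String) : Decidable (Spec_construct_dot s t out) := by unfold Spec_construct_dot; infer_instance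

-- ===== CLAIM (what is proved, stated in full; the proofs are below) =====
def Claim_equal_construct_dot : Prop := ∀ (s : String) (t : Int), Dom_construct_dot s t → Pre_construct_dot s t → Spec_construct_dot s t (construct_dot s t)

-- ===== LEMMAS AND PROOFS =====

-- the string B builds for one tuple of cut positions (n = len s)
def joinCuts (s : String) (n : Int) (cuts : List Int) : String :=
  PySem.Str.join "." (((0 :: (cuts ++ [n])).zip (cuts ++ [n])).map
    (fun ab => PySem.Str.slice s (some ab.1) (some ab.2)))

lemma alt_eq_map (s : String) (t : Int) (ht : 0 ≤ t) :
    construct_dot_alt s t =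
      (PySem.List.combinations (PySem.List.pyRange 1 (PySem.Str.len s)) t.toNat).map
        (joinCuts s (PySem.Str.len s)) := by
  unfold construct_dot_alt
  rw [if_neg (by omega)]
  have hn0 : 0 ≤ PySem.Str.len s := by rw [PySem.Str.len_eq]; omega
  by_cases hg : PySem.Str.len s ≤ t ∧ 0 < t
  · rw [if_pos hg, PySem.List.combinations_eq_nil_of_length_lt, List.map_nil]
    rw [PySem.List.length_pyRange_one]
    omega
  · rw [if_neg hg]
    simp only [PySem.List.foldl_append_singleton_eq_map, List.nil_append]
    rfl

lemma pyRange_eq_nil {a b : Int} (h : b ≤ a) : PySem.List.pyRange a b = [] := by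
  have := PySem.List.length_pyRange_one a b
  have : (PySem.List.pyRange a b).length = 0 := by omega
  exact List.eq_nil_of_length_eq_zero this

lemma pyRange_shift (c : Int) : ∀ (m : Nat) (a b : Int), (b - a).toNat = m →
    PySem.List.pyRange (a + c) (b + c) = (PySem.List.pyRange a b).map (· + c) := by
  intro m
  induction m with
  | zero =>
    intro a b h
    rw [pyRange_eq_nil (by omega), pyRange_eq_nil (by omega)]
    rfl
  | succ m ih =>
    intro a b h
    rw [PySem.List.pyRange_one_cons (show a < b by omega), PySem.List.pyRange_one_cons (show a + c < b + c by omega)]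
    have h3 : a + c + 1 = a + 1 + c := by ring
    rw [h3]
    rw [ih (a + 1) b (by omega)]
    rfl

lemma comb_flatMap (k : Nat) (b : Int) : ∀ (m : Nat) (a : Int), (b - a).toNat = m →
    PySem.List.combinations (PySem.List.pyRange a b) (k + 1) =
      (PySem.List.pyRange a b).flatMap
        (fun p => (PySem.List.combinations (PySem.List.pyRange (p + 1) b) k).map (p :: ·)) := by
  intro m
  induction m with
  | zero =>
    intro a h
    rw [pyRange_eq_nil (by omega)]
    simp [PySem.List.combinations_nil_succ]
  | succ m ih =>
    intro a h
    rw [PySem.List.pyRange_one_cons (by omega), PySem.List.combinations_cons_succ,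
        List.flatMap_cons, ih (a + 1) (by omega)]

-- slicing lemmas, at the String level
lemma slice_full (s : String) :
    PySem.Str.slice s (some 0) (some (PySem.Str.len s)) = s := by
  apply String.toList_inj.mp
  rw [PySem.Str.toList_slice]
  simp [PySem.Str.len_eq, PySem.Chars.slice_eq_listSlice, PySem.List.slice_to_natCast]

lemma len_slice_from (s : String) (p : Int) (h0 : 0 ≤ p) (hn : p ≤ PySem.Str.len s) :
    PySem.Str.len (PySem.Str.slice s (some p) none) = PySem.Str.len s - p := by
  rw [PySem.Str.len_eq, PySem.Str.toList_slice, PySem.Chars.slice_eq_listSlice,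
      PySem.List.slice_from s.toList h0]
  simp only [List.length_drop, String.length_toList, PySem.Str.len_eq] at hn ⊢
  omega

lemma slice_slice (s : String) (p a b : Int) (hp : 0 ≤ p) (ha : 0 ≤ a) (hb : 0 ≤ b) :
    PySem.Str.slice (PySem.Str.slice s (some p) none) (some a) (some b) =
      PySem.Str.slice s (some (a + p)) (some (b + p)) := by
  apply String.toList_inj.mp
  rw [PySem.Str.toList_slice, PySem.Str.toList_slice, PySem.Chars.slice_eq_listSlice,
      PySem.Chars.slice_eq_listSlice, PySem.Str.toList_slice, PySem.Chars.slice_eq_listSlice,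
      PySem.List.slice_from s.toList hp,
      PySem.List.slice_toNat _ ha hb, PySem.List.slice_toNat _ (by omega) (by omega),
      List.drop_drop]
  have h1 : p.toNat + a.toNat = (a + p).toNat := by omega
  have h2 : b.toNat - a.toNat = (b + p).toNat - (a + p).toNat := by omega
  rw [h1, h2]

-- the central string identity: prepending the first cut
lemma key_str (s : String) (p : Int) (hp0 : 0 ≤ p) (hpn : p ≤ PySem.Str.len s)
    (cs : List Int) (hcs : ∀ x ∈ cs, 0 ≤ x) :
    (PySem.Str.slice s none (some p) ++ ".") ++
      joinCuts (PySem.Str.slice s (some p) none) (PySem.Str.len s - p) cs =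
    joinCuts s (PySem.Str.len s) (p :: cs.map (· + p)) := by
  unfold joinCuts
  obtain ⟨c, Ys, hcY⟩ : ∃ c Ys, cs ++ [PySem.Str.len s - p] = c :: Ys :=
    List.exists_cons_of_ne_nil (by simp)
  have hmemY : ∀ x ∈ (0 :: (cs ++ [PySem.Str.len s - p])), 0 ≤ x := by
    intro x hx
    rcases List.mem_cons.mp hx with h | h
    · omega
    · rcases List.mem_append.mp h with h' | h'
      · exact hcs x h'
      · simp only [List.mem_singleton] at h'; omega
  have e2 : cs.map (· + p) ++ [PySem.Str.len s] =
      (cs ++ [PySem.Str.len s - p]).map (· + p) := by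
    simp
  have ezip : ((0 :: ((p :: cs.map (· + p)) ++ [PySem.Str.len s])).zip
        ((p :: cs.map (· + p)) ++ [PySem.Str.len s])).map
        (fun ab => PySem.Str.slice s (some ab.1) (some ab.2)) =
      PySem.Str.slice s (some 0) (some p) ::
        (((0 :: (cs ++ [PySem.Str.len s - p])).zip (cs ++ [PySem.Str.len s - p])).map
          (fun ab => PySem.Str.slice s (some (ab.1 + p)) (some (ab.2 + p)))) := by
    rw [List.cons_append, List.zip_cons_cons, List.map_cons]
    congr 1
    have e0 : p :: (cs.map (· + p) ++ [PySem.Str.len s]) =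
        (0 :: (cs ++ [PySem.Str.len s - p])).map (· + p) := by simp
    rw [e0, e2, List.zip_map, List.map_map]
    rfl
  rw [ezip]
  have eslices : ((0 :: (cs ++ [PySem.Str.len s - p])).zip (cs ++ [PySem.Str.len s - p])).map
        (fun ab => PySem.Str.slice s (some (ab.1 + p)) (some (ab.2 + p))) =
      ((0 :: (cs ++ [PySem.Str.len s - p])).zip (cs ++ [PySem.Str.len s - p])).map
        (fun ab => PySem.Str.slice (PySem.Str.slice s (some p) none) (some ab.1) (some ab.2)) := by
    apply List.map_congr_left
    intro ab hab
    obtain ⟨h1, h2⟩ := List.of_mem_zip hab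
    exact (slice_slice s p ab.1 ab.2 hp0 (hmemY _ h1) (hmemY _ (List.mem_cons_of_mem _ h2))).symm
  rw [eslices]
  apply String.toList_inj.mp
  rw [hcY, List.zip_cons_cons, List.map_cons]
  rw [String.toList_append, String.toList_append, PySem.Str.toList_join, PySem.Str.toList_join]
  simp only [List.map_cons]
  rw [PySem.Chars.join_cons_cons]
  have hz : (PySem.Str.slice s (some 0) (some p)).toList =
      (PySem.Str.slice s none (some p)).toList := by
    rw [PySem.Str.toList_slice, PySem.Str.toList_slice]
    simp [PySem.Chars.slice_eq_listSlice]
  rw [hz]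

-- main induction: A equals B's map-over-combinations form
lemma main_eq (k : Nat) : ∀ s : String,
    construct_dot s (k : Int) =
      (PySem.List.combinations (PySem.List.pyRange 1 (PySem.Str.len s)) k).map
        (joinCuts s (PySem.Str.len s)) := by
  induction k with
  | zero =>
    intro s
    rw [construct_dot]
    rw [if_pos (by simp)]
    rw [PySem.List.combinations_zero, List.map_cons, List.map_nil]
    unfold joinCuts
    simp only [List.nil_append, List.zip_cons_cons, List.zip_nil_right, List.map_cons,
      List.map_nil]
    rw [slice_full]
    apply congrArg (fun x => [x])
    apply String.toList_inj.mp
    rw [PySem.Str.toList_join, List.map_cons, List.map_nil, PySem.Chars.join_singleton]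
  | succ k ih =>
    intro s
    have hn0 : 0 ≤ PySem.Str.len s := by rw [PySem.Str.len_eq]; omega
    rw [construct_dot]
    rw [if_neg (by simp only [beq_iff_eq]; omega), if_neg (by omega)]
    simp only [PySem.List.foldl_append_singleton_eq_map]
    rw [PySem.List.foldl_append_eq_flatMap, List.nil_append]
    have harg : ((k + 1 : Nat) : Int) - 1 = (k : Int) := by push_cast; ring
    have hub : PySem.Str.len s - ((k + 1 : Nat) : Int) + 1 = PySem.Str.len s - (k : Int) := by
      push_cast; ring
    simp only [harg, hub]
    by_cases hsmall : PySem.Str.len s - (k : Int) ≤ 1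
    · rw [pyRange_eq_nil hsmall, PySem.List.combinations_eq_nil_of_length_lt]
      · simp
      · rw [PySem.List.length_pyRange_one]; omega
    · rw [comb_flatMap k (PySem.Str.len s) (PySem.Str.len s - 1).toNat 1 rfl,
        PySem.List.pyRange_one_append 1 (PySem.Str.len s - (k : Int)) (PySem.Str.len s)
          (by omega) (by omega),
        List.flatMap_append]
      have hz : ((PySem.List.pyRange (PySem.Str.len s - (k : Int)) (PySem.Str.len s)).flatMap
          (fun p => (PySem.List.combinations (PySem.List.pyRange (p + 1) (PySem.Str.len s)) k).map
            (p :: ·))) = [] := by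
        apply List.flatMap_eq_nil_iff.mpr
        intro p hp
        rw [PySem.List.mem_pyRange_one] at hp
        rw [PySem.List.combinations_eq_nil_of_length_lt]
        · rfl
        · rw [PySem.List.length_pyRange_one]; omega
      rw [hz, List.append_nil, List.map_flatMap]
      apply List.flatMap_congr
      intro p hp
      rw [PySem.List.mem_pyRange_one] at hp
      have hpn : p ≤ PySem.Str.len s := by omega
      rw [ih, len_slice_from s p (by omega) hpn, List.map_map]
      have e : PySem.List.pyRange (p + 1) (PySem.Str.len s) =
          (PySem.List.pyRange 1 (PySem.Str.len s - p)).map (· + p) := by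
        have h := pyRange_shift p (PySem.Str.len s - p - 1).toNat 1 (PySem.Str.len s - p) rfl
        rw [show (1 : Int) + p = p + 1 by ring,
            show PySem.Str.len s - p + p = PySem.Str.len s by ring] at h
        exact h
      rw [e, PySem.List.combinations_map, List.map_map, List.map_map]
      apply List.map_congr_left
      intro cts hcts
      have hmemc : ∀ x ∈ cts, 0 ≤ x := by
        intro x hx
        have hsub := PySem.List.sublist_of_mem_combinations hcts
        have hx' : x ∈ PySem.List.pyRange 1 (PySem.Str.len s - p) := hsub.subset hx
        rw [PySem.List.mem_pyRange_one] at hx'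
        omega
      simpa using key_str s p (by omega) hpn cts hmemc

-- ===== VERDICT (by name: the statement is the Claim_ definition above) =====
theorem construct_dot_spec : Claim_equal_construct_dot := by
  intro s t _ hpre
  unfold Spec_construct_dot
  have ht : (t.toNat : Int) = t := Int.toNat_of_nonneg hpre
  rw [alt_eq_map s t hpre, ← ht, main_eq, Int.toNat_natCast]
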